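-- pv_equiv track=rewrite | github.com/kobeomseok95/remind-algorithm | python/programmers/level2/17683.py | get_sheet_by_playtime
-- ===== SOURCE A (Python) =====
-- def get_sheet_by_playtime(play_time, sheet):
--     play_sheet = ""
--     idx = 0
--     for i in range(play_time):
--         play_sheet += sheet[idx]
--         idx = (idx + 1) % len(sheet)
--         if sheet[idx] == '#':
--             play_sheet += sheet[idx]
--             idx = (idx + 1) % len(sheet)
--     return play_sheet
-- ===== SOURCE B (Python) =====
-- def get_sheet_by_playtime(play_time, sheet):
--     n = len(sheet)
--     tokens, seen, idx = [], {}, 0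
--     while idx not in seen:
--         seen[idx] = len(tokens)
--         note = sheet[idx]
--         idx = (idx + 1) % n
--         if sheet[idx] == '#':
--             note += sheet[idx]
--             idx = (idx + 1) % n
--         tokens.append(note)
--     start = seen[idx]
--     period = len(tokens) - start
--     return ''.join(tokens[i] if i < start else tokens[start + (i - start) % period]
--                    for i in range(play_time))
-- ===== Notes on version B (the rewrite author's own statement) =====
-- stated objective: alternative
-- what changed: A walks the sheet character by character for all play_time iterations, re-deriving each note's '#' attachment on every step; B first tokenizes the sheet into whole notes along the rho-shaped index orbit (prefix + cycle, detected with a seen-dict) and then emits the play_time notes by cycling that token list with modular arithmetic.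
-- outside the precondition, e.g. on get_sheet_by_playtime(0, ''): A returns '', B raises IndexError
import Mathlib
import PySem

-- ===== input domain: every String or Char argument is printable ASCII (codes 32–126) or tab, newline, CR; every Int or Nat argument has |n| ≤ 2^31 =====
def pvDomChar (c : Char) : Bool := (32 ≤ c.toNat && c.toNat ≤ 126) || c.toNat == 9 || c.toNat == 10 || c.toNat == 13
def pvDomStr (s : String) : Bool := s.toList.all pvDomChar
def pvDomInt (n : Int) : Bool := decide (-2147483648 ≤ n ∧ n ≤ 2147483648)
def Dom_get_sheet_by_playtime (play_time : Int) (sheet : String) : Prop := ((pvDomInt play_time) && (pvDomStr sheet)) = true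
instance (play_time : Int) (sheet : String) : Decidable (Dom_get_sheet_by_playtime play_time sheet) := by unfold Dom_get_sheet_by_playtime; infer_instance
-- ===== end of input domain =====

-- B replaces A's play_time-long char-by-char walk by tokenizing one rho-shaped pass of the
-- sheet into whole notes and then cycling through that token list (objective: alternative).

-- ===== PORT A =====
-- loop body of A's `for i in range(play_time)`; state none = IndexError already raised
def pvStepA (cs : List Char) (st : Option (List Char × Int)) : Option (List Char × Int) :=
  match st with
  | none => none
  | some (acc, idx) =>
    match PySem.List.pyGet? cs idx with          -- sheet[idx]
    | none => none
    | some c =>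
      let acc1 := acc ++ [c]
      let idx1 := PySem.Int.mod (idx + 1) (cs.length : Int)   -- (idx+1) % len(sheet)
      match PySem.List.pyGet? cs idx1 with       -- sheet[idx]
      | none => none
      | some c2 =>
        if c2 = '#' then some (acc1 ++ [c2], PySem.Int.mod (idx1 + 1) (cs.length : Int))
        else some (acc1, idx1)

def get_sheet_by_playtime (play_time : Int) (sheet : String) : String :=
  let cs := sheet.toList
  match (PySem.List.pyRange 0 play_time 1).foldl (fun st _ => pvStepA cs st) (some ([], 0)) with
  | some (acc, _) => String.ofList acc
  | none => ""                                   -- Python raises IndexError here (outside Pre_)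

-- ===== PORT B =====
-- Source B's `while idx not in seen` tokenizer; seen is the dict idx -> len(tokens) as an
-- assoc list; fuel (= len(sheet)+1 at the call) only makes the recursion structural,
-- the loop always repeats an index within that many steps.
def pvTokenizeB (cs : List Char) : Nat → List (Nat × Nat) → List (List Char) → Nat →
    (List (List Char) × Nat)
  | 0, _, tokens, _ => (tokens, 0)
  | fuel + 1, seen, tokens, idx =>
    match seen.find? (fun p => p.1 == idx) with
    | some p => (tokens, p.2)                    -- idx in seen: stop; start = seen[idx]
    | none =>
      let note := [cs.getD idx ' ']              -- note = sheet[idx] (in range under Pre_)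
      let idx1 := (idx + 1) % cs.length
      if cs.getD idx1 ' ' = '#' then
        pvTokenizeB cs fuel (seen ++ [(idx, tokens.length)]) (tokens ++ [note ++ [cs.getD idx1 ' ']])
          ((idx1 + 1) % cs.length)
      else
        pvTokenizeB cs fuel (seen ++ [(idx, tokens.length)]) (tokens ++ [note]) idx1

def get_sheet_by_playtime_alt (play_time : Int) (sheet : String) : String :=
  let cs := sheet.toList
  let ts := pvTokenizeB cs (cs.length + 1) [] [] 0
  let tokens := ts.1
  let start : Int := (ts.2 : Int)
  let period : Int := (tokens.length : Int) - start
  String.ofList ((PySem.List.pyRange 0 play_time 1).flatMap (fun i =>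
    if i < start then tokens.getD i.toNat []
    else tokens.getD (start + PySem.Int.mod (i - start) period).toNat []))

-- ===== PRECONDITION & SPEC =====
-- Pre_ excludes only the empty sheet: there A raises IndexError for positive play_time
-- (and returns "" merely vacuously for play_time ≤ 0), while B's tokenizer always raises.
def Pre_get_sheet_by_playtime (play_time : Int) (sheet : String) : Prop := sheet.toList ≠ []
instance (play_time : Int) (sheet : String) : Decidable (Pre_get_sheet_by_playtime play_time sheet) := by
  unfold Pre_get_sheet_by_playtime; infer_instance
def pvWitness_get_sheet_by_playtime : Int × String := (6, "CC#BCC#BCC#BCC#B")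

def Spec_get_sheet_by_playtime (play_time : Int) (sheet : String) (out : String) : Prop := out = get_sheet_by_playtime_alt play_time sheet
instance (play_time : Int) (sheet : String) (out : String) : Decidable (Spec_get_sheet_by_playtime play_time sheet out) := by unfold Spec_get_sheet_by_playtime; infer_instance

-- ===== CLAIM (what is proved, stated in full; the proofs are below) =====
def Claim_equal_get_sheet_by_playtime : Prop := ∀ (play_time : Int) (sheet : String), Dom_get_sheet_by_playtime play_time sheet → Pre_get_sheet_by_playtime play_time sheet → Spec_get_sheet_by_playtime play_time sheet (get_sheet_by_playtime play_time sheet)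

-- ===== LEMMAS AND PROOFS =====

-- shared model of one note step: the index after playing the note starting at i,
-- and the note itself
def pvStep (cs : List Char) (i : Nat) : Nat :=
  if cs.getD ((i + 1) % cs.length) ' ' = '#' then ((i + 1) % cs.length + 1) % cs.length
  else (i + 1) % cs.length

def pvTok (cs : List Char) (i : Nat) : List Char :=
  if cs.getD ((i + 1) % cs.length) ' ' = '#' then [cs.getD i ' ', cs.getD ((i + 1) % cs.length) ' ']
  else [cs.getD i ' ']

def pvIdx (cs : List Char) : Nat → Nat
  | 0 => 0
  | k + 1 => pvStep cs (pvIdx cs k)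

lemma pvIdx_lt (cs : List Char) (hn : cs ≠ []) (k : Nat) : pvIdx cs k < cs.length := by
  have h0 : 0 < cs.length := List.length_pos_iff.mpr hn
  induction k with
  | zero => exact h0
  | succ k _ =>
    show pvStep cs (pvIdx cs k) < cs.length
    unfold pvStep
    split <;> exact Nat.mod_lt _ h0

lemma pvStepA_eq (cs : List Char) (hn : cs ≠ []) (i : Nat) (hi : i < cs.length)
    (acc : List Char) :
    pvStepA cs (some (acc, ((i : Nat) : Int))) =
      some (acc ++ pvTok cs i, ((pvStep cs i : Nat) : Int)) := by
  have h0 : 0 < cs.length := List.length_pos_iff.mpr hn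
  have hj : (i + 1) % cs.length < cs.length := Nat.mod_lt _ h0
  have hm : PySem.Int.mod ((i : Int) + 1) (cs.length : Int) =
      (((i + 1) % cs.length : Nat) : Int) := by
    have := PySem.Int.mod_natCast (i + 1) cs.length; push_cast at this ⊢; omega
  have hm2 : PySem.Int.mod ((((i + 1) % cs.length : Nat) : Int) + 1) (cs.length : Int) =
      ((((i + 1) % cs.length + 1) % cs.length : Nat) : Int) := by
    have := PySem.Int.mod_natCast ((i + 1) % cs.length + 1) cs.length
    push_cast at this ⊢; omega
  unfold pvStepA pvTok pvStep
  dsimp only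
  rw [PySem.List.pyGet?_ofNat cs i hi]
  dsimp only
  simp only [hm]
  rw [PySem.List.pyGet?_ofNat cs _ hj]
  dsimp only
  rw [List.getD_eq_getElem cs ' ' hj, List.getD_eq_getElem cs ' ' hi]
  split <;> simp only [hm2, List.append_assoc, List.singleton_append]

-- A's loop from state (acc, pvIdx k) appends the next l.length notes
lemma pvFlatMap_range_succ_left {α : Type} (f : Nat → List α) (T : Nat) :
    (List.range (T + 1)).flatMap f = f 0 ++ (List.range T).flatMap (fun t => f (t + 1)) := by
  rw [List.range_succ_eq_map]
  simp [List.flatMap_cons, List.flatMap_map]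

lemma pvA_loop (cs : List Char) (hn : cs ≠ []) (l : List Int) : ∀ (k : Nat) (acc : List Char),
    l.foldl (fun st _ => pvStepA cs st) (some (acc, ((pvIdx cs k : Nat) : Int))) =
      some (acc ++ (List.range l.length).flatMap (fun t => pvTok cs (pvIdx cs (k + t))),
            ((pvIdx cs (k + l.length) : Nat) : Int)) := by
  induction l with
  | nil => intro k acc; simp
  | cons a l ih =>
    intro k acc
    rw [List.foldl_cons, pvStepA_eq cs hn (pvIdx cs k) (pvIdx_lt cs hn k) acc]
    have hstep : pvStep cs (pvIdx cs k) = pvIdx cs (k + 1) := rfl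
    rw [hstep, ih (k + 1)]
    show some (acc ++ pvTok cs (pvIdx cs k) ++
        (List.range l.length).flatMap (fun t => pvTok cs (pvIdx cs ((k + 1) + t))),
        ((pvIdx cs ((k + 1) + l.length) : Nat) : Int)) =
      some (acc ++ (List.range (l.length + 1)).flatMap (fun t => pvTok cs (pvIdx cs (k + t))),
        ((pvIdx cs (k + (l.length + 1)) : Nat) : Int))
    rw [pvFlatMap_range_succ_left (fun t => pvTok cs (pvIdx cs (k + t)))]
    have hfun : (fun t : Nat => pvTok cs (pvIdx cs (k + (t + 1)))) =
        (fun t => pvTok cs (pvIdx cs ((k + 1) + t))) :=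
      funext fun t => by rw [show k + (t + 1) = (k + 1) + t by omega]
    rw [hfun, List.append_assoc, show k + (l.length + 1) = (k + 1) + l.length by omega]
    rfl

-- A's result is the join of the first play_time.toNat notes
lemma pvA_spec (sheet : String) (hn : sheet.toList ≠ []) (p : Int) :
    get_sheet_by_playtime p sheet =
      String.ofList ((List.range p.toNat).flatMap
        (fun t => pvTok sheet.toList (pvIdx sheet.toList t))) := by
  unfold get_sheet_by_playtime
  dsimp only
  have h := pvA_loop sheet.toList hn (PySem.List.pyRange 0 p 1) 0 []
  simp only [show ((pvIdx sheet.toList 0 : Nat) : Int) = 0 from rfl] at h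
  rw [h]
  simp [PySem.List.length_pyRange_one]

-- index periodicity
lemma pvIdx_shift (cs : List Char) (a b : Nat) (h : pvIdx cs a = pvIdx cs b) (t : Nat) :
    pvIdx cs (a + t) = pvIdx cs (b + t) := by
  induction t with
  | zero => simpa using h
  | succ t ih => show pvStep cs (pvIdx cs (a+t)) = pvStep cs (pvIdx cs (b+t)); rw [ih]

lemma pvIdx_period (cs : List Char) (s m : Nat) (hsm : s < m) (h : pvIdx cs m = pvIdx cs s)
    (t : Nat) (ht : s ≤ t) : pvIdx cs (s + (t - s) % (m - s)) = pvIdx cs t := by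
  have hP : 0 < m - s := by omega
  have key : ∀ q r : Nat, pvIdx cs (s + (r + (m - s) * q)) = pvIdx cs (s + r) := by
    intro q
    induction q with
    | zero => intro r; simp
    | succ q ih =>
      intro r
      rw [Nat.mul_succ]
      have e1 : s + (r + ((m - s) * q + (m - s))) = m + (r + (m - s) * q) := by omega
      rw [e1, pvIdx_shift cs m s h (r + (m - s) * q), ih]
  have e2 : t = s + ((t - s) % (m - s) + (m - s) * ((t - s) / (m - s))) := by
    have := Nat.mod_add_div (t - s) (m - s); omega
  conv_rhs => rw [e2]
  rw [key]

-- first match of a predicate over the image of range is at the least satisfying index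
lemma pvFind_map_range {α : Type} (g : Nat → α) (q : α → Bool) :
    ∀ (M S : Nat), S < M → q (g S) = true → (∀ j < S, q (g j) = false) →
    ((List.range M).map g).find? q = some (g S) := by
  intro M
  induction M with
  | zero => intro S h; omega
  | succ m ih =>
    intro S hSM hqS hmin
    rw [List.range_succ, List.map_append, List.find?_append]
    rcases Nat.lt_or_ge S m with h | h
    · rw [ih S h hqS hmin]; rfl
    · have hSm : S = m := by omega
      have h1 : ((List.range m).map g).find? q = none := by
        rw [List.find?_eq_none]
        intro x hx
        obtain ⟨j, hj, rfl⟩ := List.mem_map.mp hx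
        simp only [List.mem_range] at hj
        simp [hmin j (by omega)]
      rw [h1]
      subst hSm
      simp [hqS]

-- the tokenizer's trace
lemma pvTokenize_spec (cs : List Char) (hn : cs ≠ []) (M S : Nat) (hSM : S < M)
    (hrep : pvIdx cs M = pvIdx cs S)
    (hinj : ∀ a b : Nat, a < b → b < M → pvIdx cs a ≠ pvIdx cs b)
    (hS : ∀ j < S, pvIdx cs j ≠ pvIdx cs M) :
    ∀ (fuel k : Nat), k ≤ M → M + 1 - k ≤ fuel →
    pvTokenizeB cs fuel ((List.range k).map (fun j => (pvIdx cs j, j)))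
        ((List.range k).map (fun j => pvTok cs (pvIdx cs j))) (pvIdx cs k) =
      ((List.range M).map (fun j => pvTok cs (pvIdx cs j)), S) := by
  intro fuel
  induction fuel with
  | zero => intro k h1 h2; omega
  | succ fuel ih =>
    intro k hkM hfuel
    rcases Nat.lt_or_ge k M with hk | hk
    · -- idx not yet seen: the loop takes a step
      have hnone : (((List.range k).map (fun j => (pvIdx cs j, j))).find?
          (fun p => p.1 == pvIdx cs k)) = none := by
        rw [List.find?_eq_none]
        intro x hx
        obtain ⟨j, hj, rfl⟩ := List.mem_map.mp hx
        simp only [List.mem_range] at hj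
        simp [hinj j k hj hk]
      show pvTokenizeB cs (fuel + 1) _ _ _ = _
      rw [pvTokenizeB, hnone]
      have hlen : ((List.range k).map (fun j => pvTok cs (pvIdx cs j))).length = k := by simp
      have hseen : (List.range k).map (fun j => (pvIdx cs j, j)) ++ [(pvIdx cs k, k)] =
          (List.range (k + 1)).map (fun j => (pvIdx cs j, j)) := by
        rw [List.range_succ, List.map_append]; rfl
      have htok : (List.range k).map (fun j => pvTok cs (pvIdx cs j)) ++ [pvTok cs (pvIdx cs k)] =
          (List.range (k + 1)).map (fun j => pvTok cs (pvIdx cs j)) := by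
        rw [List.range_succ, List.map_append]; rfl
      by_cases hsh : cs.getD ((pvIdx cs k + 1) % cs.length) ' ' = '#'
      · simp only [hsh, if_pos, hlen]
        rw [hseen, show [cs.getD (pvIdx cs k) ' '] ++ ['#'] =
            pvTok cs (pvIdx cs k) from by unfold pvTok; rw [if_pos hsh, hsh]; rfl, htok,
          show ((pvIdx cs k + 1) % cs.length + 1) % cs.length = pvIdx cs (k + 1) from by
            rw [show pvIdx cs (k + 1) = pvStep cs (pvIdx cs k) from rfl]
            unfold pvStep; rw [if_pos hsh]]
        exact ih (k + 1) (by omega) (by omega)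
      · simp only [hsh, hlen, if_false]
        rw [hseen, show [cs.getD (pvIdx cs k) ' '] = pvTok cs (pvIdx cs k) from by
            unfold pvTok; rw [if_neg hsh], htok,
          show (pvIdx cs k + 1) % cs.length = pvIdx cs (k + 1) from by
            rw [show pvIdx cs (k + 1) = pvStep cs (pvIdx cs k) from rfl]
            unfold pvStep; rw [if_neg hsh]]
        exact ih (k + 1) (by omega) (by omega)
    · -- k = M: idx repeats, the loop stops and looks up S
      have hkM' : k = M := by omega
      subst hkM'
      have hfind := pvFind_map_range (fun j => ((pvIdx cs j, j) : Nat × Nat))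
        (fun p => p.1 == pvIdx cs k) k S hSM (by simp [hrep.symm]) (fun j hj => by
          simp only [beq_eq_false_iff_ne, ne_eq]
          exact hS j hj)
      show pvTokenizeB cs (fuel + 1) _ _ _ = _
      rw [pvTokenizeB, hfind]

-- existence of the rho point
lemma pvRho (cs : List Char) (hn : cs ≠ []) :
    ∃ M S : Nat, S < M ∧ M ≤ cs.length ∧ pvIdx cs M = pvIdx cs S ∧
      (∀ a b : Nat, a < b → b < M → pvIdx cs a ≠ pvIdx cs b) ∧
      (∀ j < S, pvIdx cs j ≠ pvIdx cs M) := by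
  have h0 : 0 < cs.length := List.length_pos_iff.mpr hn
  have hcard : (Finset.range cs.length).card < (Finset.range (cs.length + 1)).card := by simp
  obtain ⟨x, hx, y, hy, hne, hfeq⟩ :=
    Finset.exists_ne_map_eq_of_card_lt_of_maps_to hcard
      (f := fun a => pvIdx cs a) (fun a _ => Finset.mem_range.mpr (pvIdx_lt cs hn a))
  simp only [Finset.mem_range] at hx hy
  haveI hdec : DecidablePred (fun b => ∃ a, a < b ∧ pvIdx cs a = pvIdx cs b) := fun b => by
    infer_instance
  have hP : ∃ b, ∃ a, a < b ∧ pvIdx cs a = pvIdx cs b := by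
    rcases Nat.lt_or_ge x y with h | h
    · exact ⟨y, x, h, hfeq⟩
    · exact ⟨x, y, lt_of_le_of_ne h (Ne.symm hne), hfeq.symm⟩
  set M := Nat.find hP with hM
  obtain ⟨s0, hs0M, hs0⟩ := Nat.find_spec hP
  have hQ : ∃ j, j < M ∧ pvIdx cs j = pvIdx cs M := ⟨s0, hs0M, hs0⟩
  set S := Nat.find hQ with hSdef
  obtain ⟨hSM, hSeq⟩ := Nat.find_spec hQ
  refine ⟨M, S, hSM, ?_, hSeq.symm, ?_, ?_⟩
  · -- M ≤ cs.length
    have hb : ∃ a, a < max x y ∧ pvIdx cs a = pvIdx cs (max x y) := by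
      rcases Nat.lt_or_ge x y with h | h
      · rw [Nat.max_eq_right (le_of_lt h)]; exact ⟨x, h, hfeq⟩
      · rw [Nat.max_eq_left h]; exact ⟨y, lt_of_le_of_ne h (Ne.symm hne), hfeq.symm⟩
    exact le_trans (Nat.find_min' hP hb) (by omega)
  · intro a b hab hbM heq
    exact Nat.find_min hP hbM ⟨a, hab, heq⟩
  · intro j hj heq
    exact Nat.find_min hQ hj ⟨by omega, heq⟩

lemma pvB_spec (sheet : String) (hn : sheet.toList ≠ []) (p : Int) :
    get_sheet_by_playtime_alt p sheet =
      String.ofList ((List.range p.toNat).flatMap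
        (fun t => pvTok sheet.toList (pvIdx sheet.toList t))) := by
  obtain ⟨M, S, hSM, hMle, hrep, hinj, hS⟩ := pvRho sheet.toList hn
  have htk := pvTokenize_spec sheet.toList hn M S hSM hrep hinj hS
    (sheet.toList.length + 1) 0 (by omega) (by omega)
  simp only [List.range_zero, List.map_nil] at htk
  rw [show pvIdx sheet.toList 0 = 0 from rfl] at htk
  unfold get_sheet_by_playtime_alt
  dsimp only
  rw [htk]
  have hget : ∀ j, j < M →
      (((List.range M).map (fun j => pvTok sheet.toList (pvIdx sheet.toList j))).getD j []) =
        pvTok sheet.toList (pvIdx sheet.toList j) := by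
    intro j hj
    rw [List.getD_eq_getElem _ _ (by simp [hj])]
    simp
  congr 1
  rw [PySem.List.pyRange_one, List.flatMap_map]
  simp only [Int.sub_zero, zero_add]
  apply List.flatMap_congr
  intro t _
  simp only [List.length_map, List.length_range]
  by_cases hts : t < S
  · rw [if_pos (by exact_mod_cast hts), Int.toNat_natCast]
    exact hget t (by omega)
  · have hts' : S ≤ t := Nat.le_of_not_lt hts
    rw [if_neg (by exact_mod_cast hts)]
    have e1 : ((t : Int) - (S : Int)) = (((t - S : Nat)) : Int) := by omega
    have e2 : ((M : Int) - (S : Int)) = (((M - S : Nat)) : Int) := by omega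
    rw [e1, e2, PySem.Int.mod_natCast]
    rw [show ((S : Int) + (((t - S) % (M - S) : Nat) : Int)) =
      (((S + (t - S) % (M - S) : Nat)) : Int) from by push_cast; ring, Int.toNat_natCast]
    have hlt : S + (t - S) % (M - S) < M := by
      have := Nat.mod_lt (t - S) (y := M - S) (by omega)
      omega
    rw [hget _ hlt, pvIdx_period sheet.toList S M hSM hrep t hts']

-- ===== VERDICT (by name: the statement is the Claim_ definition above) =====
theorem get_sheet_by_playtime_spec : Claim_equal_get_sheet_by_playtime := by
  intro p sheet _ hpre
  unfold Spec_get_sheet_by_playtime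
  have hcs : sheet.toList ≠ [] := hpre
  rw [pvA_spec sheet hcs p, pvB_spec sheet hcs p]
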